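-- pv_equiv track=rewrite | github.com/mikowhychuck/tictactoe | main.py | stworz_plansze
-- ===== SOURCE A (Python) =====
-- def stworz_plansze(size):
--     board = []
--     for i in range(size):
--         row = []
--         for j in range(size):
--             row.append("[ ]")
--         board.append(row)
--     for i in range(size):
--         if i<10:
--             board[0][i] = f" {i} "
--         else:
--             board[0][i] = f" {i}"
--     for i in range(size):
--         if i<10:
--             board[i][0] = f"{i} "
--         else:
--             board[i][0] = f"{i}"
--     board[0][0] = "  "
--     return board
-- ===== SOURCE B (Python) =====
-- def stworz_plansze(size):
--     def cell(i, j):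
--         if i == 0 and j == 0:
--             return "  "
--         if i == 0:
--             return f" {j} " if j < 10 else f" {j}"
--         if j == 0:
--             return f"{i} " if i < 10 else f"{i}"
--         return "[ ]"
--     return [[cell(i, j) for j in range(size)] for i in range(size)]
-- ===== Notes on version B (the rewrite author's own statement) =====
-- stated objective: simpler
-- what changed: B computes each cell directly from its position (i,j) in one nested comprehension, instead of A's fill-everything-then-relabel-row-0-then-relabel-column-0-then-patch-corner sequence of four passes.
-- crash fix: For size <= 0 A raises IndexError on board[0][0] while B returns the empty board []. — e.g. on stworz_plansze(0): A raises IndexError, B returns []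
import Mathlib
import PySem

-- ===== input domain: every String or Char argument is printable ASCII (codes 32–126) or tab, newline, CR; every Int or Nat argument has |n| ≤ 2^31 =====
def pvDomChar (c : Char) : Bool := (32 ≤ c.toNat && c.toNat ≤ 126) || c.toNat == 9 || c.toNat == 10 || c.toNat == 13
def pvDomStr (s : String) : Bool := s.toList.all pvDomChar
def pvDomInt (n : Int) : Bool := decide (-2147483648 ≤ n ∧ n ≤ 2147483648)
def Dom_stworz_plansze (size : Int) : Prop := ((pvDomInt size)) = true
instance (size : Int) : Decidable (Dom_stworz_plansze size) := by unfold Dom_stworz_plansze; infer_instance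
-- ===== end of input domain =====

-- B builds the board in one nested comprehension, computing each cell directly from its
-- position, instead of A's fill-then-relabel-row-0-then-relabel-column-0-then-patch-corner
-- passes; for size <= 0 A raises IndexError while B returns [] (see Raises_).


-- ===== PORT A =====
-- board[r][c] = v  (r, c here are nonnegative and, under Pre_, in range — where Python would
-- raise IndexError, the input is excluded by Pre_)
def pvSetIJ (b : List (List String)) (r c : Int) (v : String) : List (List String) :=
  b.modify r.toNat (fun row => row.set c.toNat v)

def stworz_plansze (size : Int) : List (List String) :=
  let board := (PySem.List.pyRange 0 size 1).foldl
    (fun b _i => b ++ [(PySem.List.pyRange 0 size 1).foldl (fun r _j => r ++ ["[ ]"]) []]) []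
  let board := (PySem.List.pyRange 0 size 1).foldl
    (fun b i => pvSetIJ b 0 i (if i < 10 then " " ++ PySem.Int.toStr i ++ " " else " " ++ PySem.Int.toStr i)) board
  let board := (PySem.List.pyRange 0 size 1).foldl
    (fun b i => pvSetIJ b i 0 (if i < 10 then PySem.Int.toStr i ++ " " else PySem.Int.toStr i)) board
  pvSetIJ board 0 0 "  "

-- ===== PORT B =====
def pvCell (i j : Int) : String :=
  if i = 0 ∧ j = 0 then "  "
  else if i = 0 then (if j < 10 then " " ++ PySem.Int.toStr j ++ " " else " " ++ PySem.Int.toStr j)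
  else if j = 0 then (if i < 10 then PySem.Int.toStr i ++ " " else PySem.Int.toStr i)
  else "[ ]"

def stworz_plansze_alt (size : Int) : List (List String) :=
  (PySem.List.pyRange 0 size 1).map
    (fun i => (PySem.List.pyRange 0 size 1).map (fun j => pvCell i j))

-- ===== PRECONDITION & SPEC =====
-- For size <= 0 the Python A raises IndexError on board[0][0]; those inputs are excluded.
def Pre_stworz_plansze (size : Int) : Prop := 1 ≤ size
instance (size : Int) : Decidable (Pre_stworz_plansze size) := by unfold Pre_stworz_plansze; infer_instance
def pvWitness_stworz_plansze : Int := 3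

-- For size <= 0 A raises IndexError (board[0][0] on an empty board) while B returns [].
def Raises_stworz_plansze (size : Int) : Prop := size ≤ 0
instance (size : Int) : Decidable (Raises_stworz_plansze size) := by unfold Raises_stworz_plansze; infer_instance
def pvRaiseWitness_stworz_plansze : Int := 0
def pvRaiseWitnessOut_stworz_plansze : List (List String) := []

def Spec_stworz_plansze (size : Int) (out : List (List String)) : Prop := out = stworz_plansze_alt size
instance (size : Int) (out : List (List String)) : Decidable (Spec_stworz_plansze size out) := by unfold Spec_stworz_plansze; infer_instance

-- ===== CLAIM (what is proved, stated in full; the proofs are below) =====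
def Claim_equal_stworz_plansze : Prop := ∀ (size : Int), Dom_stworz_plansze size → Pre_stworz_plansze size → Spec_stworz_plansze size (stworz_plansze size)
def Claim_raises_stworz_plansze : Prop := (∀ (size : Int), Dom_stworz_plansze size → Raises_stworz_plansze size → ¬ Pre_stworz_plansze size) ∧ (Dom_stworz_plansze (pvRaiseWitness_stworz_plansze) ∧ Raises_stworz_plansze (pvRaiseWitness_stworz_plansze) ∧ stworz_plansze_alt (pvRaiseWitness_stworz_plansze) = pvRaiseWitnessOut_stworz_plansze)

-- ===== LEMMAS AND PROOFS =====

-- a fold of modifies at indices 0..n-1, read back through getElem?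
theorem getElem?_foldl_modify {α : Type} (g : Nat → α → α) (b : List α) (n k : Nat) :
    ((List.range n).foldl (fun b i => b.modify i (g i)) b)[k]? =
      if k < n then (g k) <$> b[k]? else b[k]? := by
  induction n with
  | zero => simp
  | succ m ih =>
    rw [List.range_succ, List.foldl_append]
    simp only [List.foldl_cons, List.foldl_nil, List.getElem?_modify, ih]
    by_cases hk : k = m
    · subst hk; simp
    · have hmk : m ≠ k := fun h => hk h.symm
      by_cases h1 : k < m
      · have : k < m + 1 := by omega
        simp only [if_pos h1, if_pos this]
        cases b[k]? <;> simp [hmk]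
      · have : ¬ k < m + 1 := by omega
        simp only [if_neg h1, if_neg this]
        cases b[k]? <;> simp [hmk]

-- a fold of modifies all at index r composes into one modify at r
theorem foldl_modify_fixed {α β : Type} (h : β → α → α) (r : Nat) (l : List β) (b : List α) :
    l.foldl (fun b x => b.modify r (h x)) b =
      b.modify r (fun a => l.foldl (fun a x => h x a) a) := by
  induction l generalizing b with
  | nil =>
    apply List.ext_getElem?
    intro i
    rw [List.getElem?_modify]
    cases hbi : b[i]? <;> simp [hbi]
  | cons x xs ih =>
    simp only [List.foldl_cons, ih]
    apply List.ext_getElem?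
    intro i
    simp only [List.getElem?_modify]
    cases b[i]? <;> by_cases hi : r = i <;> simp [hi]

theorem stworz_plansze_eq (n : Nat) :
    stworz_plansze (n : Int) = stworz_plansze_alt (n : Int) := by
  have hR : PySem.List.pyRange 0 (n : Int) 1 = (List.range n).map (fun (k : Nat) => (k : Int)) :=
    PySem.List.pyRange_zero_natCast n
  unfold stworz_plansze stworz_plansze_alt
  simp only [hR, PySem.List.foldl_append_singleton_eq_map, List.foldl_map, List.map_map,
    Function.comp_def, pvSetIJ, Int.toNat_natCast, Int.toNat_zero, List.nil_append]
  set baseRow : List String := List.map (fun (_ : Nat) => "[ ]") (List.range n) with hbase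
  have hbaseLen : baseRow.length = n := by simp [hbase]
  have hbaseGet : ∀ j : Nat, baseRow[j]? = if j < n then some "[ ]" else none := by
    intro j; by_cases hj : j < n <;> simp [hbase, hj]
  -- the header pass: row 0 after all header sets
  have hF : ∀ j : Nat,
      (List.foldl (fun (a : List String) (x : Nat) => a.set x (if (x : Int) < 10 then " " ++ PySem.Int.toStr (x : Int) ++ " " else " " ++ PySem.Int.toStr (x : Int))) baseRow (List.range n))[j]? =
        if j < n then some (if ((j:Nat) : Int) < 10 then " " ++ PySem.Int.toStr ((j:Nat) : Int) ++ " " else " " ++ PySem.Int.toStr ((j:Nat) : Int)) else none := by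
    intro j
    rw [show (fun (a : List String) (x : Nat) => a.set x (if (x : Int) < 10 then " " ++ PySem.Int.toStr (x : Int) ++ " " else " " ++ PySem.Int.toStr (x : Int)))
          = fun (a : List String) (x : Nat) => a.modify x (fun _ => (if (x : Int) < 10 then " " ++ PySem.Int.toStr (x : Int) ++ " " else " " ++ PySem.Int.toStr (x : Int))) from
        funext fun a => funext fun x => List.set_eq_modify _ _ _]
    rw [getElem?_foldl_modify]
    by_cases hj : j < n <;> simp [hj, hbaseGet j]
  have hFlen :
      (List.foldl (fun (a : List String) (x : Nat) => a.set x (if (x : Int) < 10 then " " ++ PySem.Int.toStr (x : Int) ++ " " else " " ++ PySem.Int.toStr (x : Int))) baseRow (List.range n)).length = n := by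
    have : ∀ (l : List Nat) (r : List String),
        (l.foldl (fun (a : List String) (x : Nat) => a.set x (if (x : Int) < 10 then " " ++ PySem.Int.toStr (x : Int) ++ " " else " " ++ PySem.Int.toStr (x : Int))) r).length = r.length := by
      intro l; induction l with
      | nil => intro r; rfl
      | cons x xs ih => intro r; rw [List.foldl_cons, ih, List.length_set]
    rw [this]; exact hbaseLen
  rw [foldl_modify_fixed]
  apply List.ext_getElem?
  intro k
  rw [List.getElem?_modify]   -- the final corner patch board[0][0] = "  "
  rw [getElem?_foldl_modify (fun (i : Nat) (row : List String) => row.set 0 (if (i : Int) < 10 then PySem.Int.toStr (i : Int) ++ " " else PySem.Int.toStr (i : Int)))]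
  rw [List.getElem?_modify]   -- the header pass folded into one modify at row 0
  by_cases hk : k < n
  · have hconst : (List.map (fun (_ : Nat) => baseRow) (List.range n))[k]? = some baseRow := by
      simp [hk]
    have hRHS : (List.map (fun (i : Nat) => List.map (fun (j : Nat) => pvCell (i : Int) (j : Int)) (List.range n)) (List.range n))[k]? = some (List.map (fun (j : Nat) => pvCell (k : Int) (j : Int)) (List.range n)) := by
      simp [hk]
    rw [hconst, hRHS]
    simp only [Option.map_eq_map, Option.map_some, if_pos hk, Option.some.injEq]
    by_cases hk0 : 0 = k
    · subst hk0
      simp only [if_true]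
      apply List.ext_getElem?
      intro j
      rw [List.set_eq_modify, List.getElem?_modify, List.set_eq_modify, List.getElem?_modify]
      by_cases hj : j < n
      · have hrj : ((List.range n).map (fun (j : Nat) => pvCell ((0:Nat) : Int) (j : Int)))[j]? = some (pvCell ((0:Nat) : Int) (j : Int)) := by
          simp [hj]
        rw [hF j, if_pos hj, hrj]
        by_cases hj0 : 0 = j
        · subst hj0
          simp [pvCell]
        · have hj0' : (j : Int) ≠ 0 := by
            intro h; exact hj0 (by exact_mod_cast h.symm)
          have hj0n : ¬ j = 0 := fun h => hj0 h.symm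
          simp only [Option.map_eq_map, Option.map_some, if_neg hj0, Option.some.injEq]
          simp [pvCell, hj0n]
      · have hrj : ((List.range n).map (fun (j : Nat) => pvCell ((0:Nat) : Int) (j : Int)))[j]? = none := by
          simp; omega
        rw [hF j, if_neg hj, hrj]
        simp
    · simp only [if_neg hk0]
      apply List.ext_getElem?
      intro j
      rw [List.set_eq_modify, List.getElem?_modify]
      have hk0' : (k : Int) ≠ 0 := by
        intro h; exact hk0 (by exact_mod_cast h.symm)
      by_cases hj : j < n
      · have hrj : ((List.range n).map (fun (j : Nat) => pvCell (k : Int) (j : Int)))[j]? = some (pvCell (k : Int) (j : Int)) := by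
          simp [hj]
        rw [hbaseGet j, if_pos hj, hrj]
        by_cases hj0 : 0 = j
        · subst hj0
          have hk0n : ¬ k = 0 := fun h => hk0 h.symm
          simp only [Option.map_eq_map, Option.map_some, if_true, Option.some.injEq]
          simp [pvCell, hk0n]
        · have hj0' : (j : Int) ≠ 0 := by
            intro h; exact hj0 (by exact_mod_cast h.symm)
          have hk0n : ¬ k = 0 := fun h => hk0 h.symm
          have hj0n : ¬ j = 0 := fun h => hj0 h.symm
          simp only [Option.map_eq_map, Option.map_some, if_neg hj0, Option.some.injEq]
          simp [pvCell, hk0n, hj0n]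
      · have hrj : ((List.range n).map (fun (j : Nat) => pvCell (k : Int) (j : Int)))[j]? = none := by
          simp; omega
        rw [hbaseGet j, if_neg hj, hrj]
        simp
  · simp [hk]

-- ===== VERDICT (by name: the statement is the Claim_ definition above) =====
theorem stworz_plansze_spec : Claim_equal_stworz_plansze := by
  intro size _ hpre
  unfold Spec_stworz_plansze
  unfold Pre_stworz_plansze at hpre
  have h0 : 0 ≤ size := by omega
  obtain ⟨n, rfl⟩ := Int.eq_ofNat_of_zero_le h0
  exact stworz_plansze_eq n

def stworz_plansze_raises : Claim_raises_stworz_plansze := by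
  unfold Claim_raises_stworz_plansze
  constructor
  · intro size _ hr hp
    unfold Raises_stworz_plansze at hr; unfold Pre_stworz_plansze at hp; omega
  · exact ⟨by decide, by decide, by decide⟩
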